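-- pv_equiv track=rewrite | github.com/SpartanEngineer/SpartanCheckers | checkersengine.py | isRunaway
-- ===== SOURCE A (Python) =====
-- def isRunaway(board, index, backRow, moveMapping):
--     zeroIndex = index-1
--     if(zeroIndex in backRow):
--         return board[zeroIndex] == 0
--     if(board[zeroIndex] == 0):
--         result = True
--         for m in moveMapping[index]:
--             result = (result and isRunaway(board, m, backRow, moveMapping))
--         return result
--
--     return False
-- ===== SOURCE B (Python) =====
-- def isRunaway(board, index, backRow, moveMapping):
--     # Memoized depth-first search over the move graph: each square's runaway
--     # status is computed at most once and reused, instead of once per path.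
--     backs = set(backRow)
--     cache = {}
--     def check(i):
--         if i not in cache:
--             zi = i - 1
--             if zi in backs:
--                 cache[i] = board[zi] == 0
--             elif board[zi] == 0:
--                 cache[i] = all(check(m) for m in moveMapping[i])
--             else:
--                 cache[i] = False
--         return cache[i]
--     return check(index)
-- ===== Notes on version B (the rewrite author's own statement) =====
-- stated objective: alternative
-- what changed: Replaced A's naive recursion (which re-evaluates a square once per path reaching it) by a memoized depth-first search that caches each square's runaway status in a dict so every square is evaluated at most once; Pre_ restricts to move graphs whose empty non-back-row squares have in-range, strictly-forward move lists (the checkers domain, on which A terminates) -- outside it A can raise IndexError/KeyError/RecursionError, and on the few excluded inputs where A still returns (its run happens not to reach the flawed square) B returns the same value.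
-- outside the precondition, e.g. on isRunaway([0, 0], 2, [1], {1: [0]}): A returns True, B returns True; on isRunaway([0, 0], 1, [], {1: [2], 2: [1]}): A raises RecursionError, B raises RecursionError
import Mathlib
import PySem

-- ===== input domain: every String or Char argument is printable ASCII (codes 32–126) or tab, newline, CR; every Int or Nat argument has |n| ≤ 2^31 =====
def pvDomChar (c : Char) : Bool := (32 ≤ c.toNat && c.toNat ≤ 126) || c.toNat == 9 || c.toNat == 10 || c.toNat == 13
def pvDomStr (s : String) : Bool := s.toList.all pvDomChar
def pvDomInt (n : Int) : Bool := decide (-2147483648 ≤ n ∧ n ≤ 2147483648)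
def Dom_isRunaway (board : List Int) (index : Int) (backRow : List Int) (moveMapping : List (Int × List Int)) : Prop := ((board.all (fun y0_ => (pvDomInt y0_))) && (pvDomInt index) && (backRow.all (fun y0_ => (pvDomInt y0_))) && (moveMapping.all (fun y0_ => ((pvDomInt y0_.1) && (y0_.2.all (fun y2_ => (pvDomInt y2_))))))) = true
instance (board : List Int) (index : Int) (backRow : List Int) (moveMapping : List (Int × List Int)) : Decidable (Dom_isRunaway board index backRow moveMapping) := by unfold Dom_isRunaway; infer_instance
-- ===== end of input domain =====

-- B replaces A's naive recursion (one evaluation per path reaching a square) by a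
-- memoized depth-first search caching each square's runaway status in a dict, so
-- every square is evaluated at most once; equivalence is proved on Pre_
-- (well-formed forward move graphs), outside which A may raise.

-- ===== PORT A =====
-- dict lookup: first match in the association list (Python dict semantics)
def pvMMGet (mm : List (Int × List Int)) (i : Int) : Option (List Int) :=
  (mm.find? (fun p => p.1 == i)).map (·.2)

-- A's recursion, made total with fuel (none = fuel exhausted or a Python exception:
-- IndexError / KeyError; Pre_ excludes all of these)
def pvGoA (board : List Int) (backRow : List Int) (mm : List (Int × List Int)) :
    Nat → Int → Option Bool
  | 0, _ => none
  | fuel+1, index =>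
    let zeroIndex := index - 1
    if backRow.contains zeroIndex then
      (PySem.List.pyGet? board zeroIndex).map (fun v => v == 0)
    else
      match PySem.List.pyGet? board zeroIndex with
      | none => none
      | some v =>
        if v == 0 then
          match pvMMGet mm index with
          | none => none
          | some ms =>
            -- for m in moveMapping[index]: result = result and isRunaway(...)
            -- ('and' short-circuits: once result is False no further call is made)
            ms.foldl (fun acc m =>
              match acc with
              | none => none
              | some false => some false
              | some true => pvGoA board backRow mm fuel m) (some true)
        else some false

def isRunaway (board : List Int) (index : Int) (backRow : List Int) (moveMapping : List (Int × List Int)) : Bool :=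
  (pvGoA board backRow moveMapping (board.length + board.length + 2) index).getD false

-- ===== PORT B =====
-- Source B's inner 'check': memoized recursion threading the cache dict; fuel only
-- makes it total (never exhausted under Pre_)
def pvCheckB (board : List Int) (backs : List Int) (mm : List (Int × List Int)) :
    Nat → Int → PySem.Dict Int Bool → Bool × PySem.Dict Int Bool
  | 0, _, cache => (false, cache)
  | fuel+1, i, cache =>
    match cache.get? i with
    | some v => (v, cache)
    | none =>
      let zi := i - 1
      let (v, cache') :=
        if backs.contains zi then
          (((PySem.List.pyGet? board zi).getD 0) == 0, cache)
        else if ((PySem.List.pyGet? board zi).getD 0) == 0 then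
          -- all(check(m) for m in moveMapping[i]): short-circuits, threads the cache
          ((pvMMGet mm i).getD []).foldl
            (fun acc m => if acc.1 then pvCheckB board backs mm fuel m acc.2 else acc)
            (true, cache)
        else (false, cache)
      (v, cache'.insert i v)

def isRunaway_alt (board : List Int) (index : Int) (backRow : List Int) (moveMapping : List (Int × List Int)) : Bool :=
  (pvCheckB board (PySem.Set.ofList backRow) moveMapping
    (board.length + board.length + 2) index PySem.Dict.empty).1

-- ===== PRECONDITION & SPEC =====
def pvOk (n i : Int) : Bool := decide (1 - n ≤ i) && decide (i ≤ n)
-- square i is 'active': A recurses through it (empty, not a back-row square)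
def pvActive (board : List Int) (backRow : List Int) (i : Int) : Bool :=
  !backRow.contains (i - 1) && (PySem.List.pyGet? board (i - 1) == some 0)
-- Pre_: index is in range, and the move graph is well formed where A recurses:
-- the start square and every active move target have a move list, and moves of
-- active squares are in range and strictly forward into other active squares.
-- Outside Pre_ A raises IndexError/KeyError/RecursionError, or returns only
-- because its run happens not to reach the flawed square (B agrees there too,
-- but the simple structural criterion cannot see it).
def Pre_isRunaway (board : List Int) (index : Int) (backRow : List Int) (moveMapping : List (Int × List Int)) : Prop :=
  pvOk board.length index = true ∧
  (pvActive board backRow index = true → (pvMMGet moveMapping index).isSome = true) ∧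
  ∀ p ∈ moveMapping, pvActive board backRow p.1 = true →
    ∀ m ∈ p.2, pvOk board.length m = true ∧
      (pvActive board backRow m = true → p.1 < m ∧ (pvMMGet moveMapping m).isSome = true)
instance (board : List Int) (index : Int) (backRow : List Int) (moveMapping : List (Int × List Int)) : Decidable (Pre_isRunaway board index backRow moveMapping) := by unfold Pre_isRunaway; infer_instance

def pvWitness_isRunaway : List Int × Int × List Int × (List (Int × List Int)) :=
  ([0, 0], 1, [1], [(1, [2])])

def Spec_isRunaway (board : List Int) (index : Int) (backRow : List Int) (moveMapping : List (Int × List Int)) (out : Bool) : Prop := out = isRunaway_alt board index backRow moveMapping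
instance (board : List Int) (index : Int) (backRow : List Int) (moveMapping : List (Int × List Int)) (out : Bool) : Decidable (Spec_isRunaway board index backRow moveMapping out) := by unfold Spec_isRunaway; infer_instance

-- ===== CLAIM (what is proved, stated in full; the proofs are below) =====
def Claim_equal_isRunaway : Prop := ∀ (board : List Int) (index : Int) (backRow : List Int) (moveMapping : List (Int × List Int)), Dom_isRunaway board index backRow moveMapping → Pre_isRunaway board index backRow moveMapping → Spec_isRunaway board index backRow moveMapping (isRunaway board index backRow moveMapping)

-- ===== LEMMAS AND PROOFS =====

-- canonical value of A's recursion at square i (fuel just large enough)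
def pvVal (board : List Int) (backRow : List Int) (mm : List (Int × List Int)) (i : Int) : Bool :=
  (pvGoA board backRow mm (((board.length : Int) - i).toNat + 2) i).getD false

-- value at a square answered without recursion
def pvSval (board : List Int) (backRow : List Int) (i : Int) : Bool :=
  if backRow.contains (i - 1) then ((PySem.List.pyGet? board (i - 1)).getD 0) == 0 else false

-- the safety hypothesis extracted from Pre_ for first-match lookups
def pvSafe (board : List Int) (backRow : List Int) (mm : List (Int × List Int)) : Prop :=
  ∀ i ms, pvMMGet mm i = some ms → pvActive board backRow i = true →
    ∀ m ∈ ms, pvOk board.length m = true ∧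
      (pvActive board backRow m = true → i < m ∧ (pvMMGet mm m).isSome = true)

lemma pv_get_some (board : List Int) (i : Int) (h : pvOk board.length i = true) :
    ∃ v, PySem.List.pyGet? board (i - 1) = some v := by
  simp only [pvOk, Bool.and_eq_true, decide_eq_true_eq] at h
  cases hg : PySem.List.pyGet? board (i - 1) with
  | some v => exact ⟨v, rfl⟩
  | none =>
    rw [PySem.List.pyGet?_eq_none_iff] at hg
    exact absurd (by unfold PySem.Raise.InRange; omega) hg

lemma pv_mmget_mem (mm : List (Int × List Int)) (i : Int) (ms : List Int)
    (h : pvMMGet mm i = some ms) : (i, ms) ∈ mm := by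
  unfold pvMMGet at h
  cases hf : mm.find? (fun p => p.1 == i) with
  | none => rw [hf] at h; simp at h
  | some p =>
    rw [hf] at h
    simp only [Option.map_some, Option.some.injEq] at h
    have hmem := List.mem_of_find?_eq_some hf
    have hp := List.find?_some hf
    simp only [beq_iff_eq] at hp
    have : p = (i, ms) := by cases p; simp_all
    rwa [this] at hmem

lemma pv_safe_of_pre (board : List Int) (index : Int) (backRow : List Int)
    (mm : List (Int × List Int)) (h : Pre_isRunaway board index backRow mm) :
    pvSafe board backRow mm := by
  intro i ms hms hact m hm
  exact h.2.2 (i, ms) (pv_mmget_mem mm i ms hms) hact m hm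

lemma pv_foldsc (g : Int → Option Bool) (f : Int → Bool) :
    ∀ (ms : List Int) (b : Bool), (∀ m ∈ ms, g m = some (f m)) →
    ms.foldl (fun acc m =>
      match acc with
      | none => none
      | some false => some false
      | some true => g m) (some b) = some (b && ms.all f) := by
  intro ms
  induction ms with
  | nil => intro b _; simp
  | cons m rest ih =>
    intro b h
    have hm := h m List.mem_cons_self
    have hrest : ∀ x ∈ rest, g x = some (f x) := fun x hx => h x (List.mem_cons_of_mem _ hx)
    cases b with
    | false =>
      simp only [List.foldl_cons]
      rw [ih false hrest]
      simp
    | true =>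
      simp only [List.foldl_cons, hm]
      cases hf : f m with
      | false =>
        rw [ih false hrest]
        simp [List.all_cons, hf]
      | true =>
        rw [ih true hrest]
        simp [List.all_cons, hf]

-- A answers an inactive in-range square in one step, with any positive fuel
lemma pv_goA_shallow (board : List Int) (backRow : List Int) (mm : List (Int × List Int))
    (i : Int) (fuel : Nat) (hf : 0 < fuel) (hok : pvOk board.length i = true)
    (hact : ¬ pvActive board backRow i = true) :
    pvGoA board backRow mm fuel i = some (pvSval board backRow i) := by
  obtain ⟨f, rfl⟩ : ∃ f, fuel = f + 1 := ⟨fuel - 1, by omega⟩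
  obtain ⟨v, hv⟩ := pv_get_some board i hok
  simp only [pvActive, Bool.and_eq_true, Bool.not_eq_true', beq_iff_eq] at hact
  unfold pvGoA pvSval
  by_cases hbr : (i - 1) ∈ backRow
  · simp [hbr, hv]
  · have hc : backRow.contains (i - 1) = false := by simpa [List.contains_iff_mem] using hbr
    have hv0 : ¬ v = 0 := by
      intro h0
      exact hact ⟨hc, by rw [hv, h0]⟩
    simp [hbr, hv, hv0]

lemma pv_sval_eq (board : List Int) (backRow : List Int) (mm : List (Int × List Int))
    (i : Int) (hok : pvOk board.length i = true)
    (hact : ¬ pvActive board backRow i = true) :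
    pvVal board backRow mm i = pvSval board backRow i := by
  unfold pvVal
  rw [pv_goA_shallow board backRow mm i _ (by omega) hok hact]
  rfl

-- with any sufficient fuel, A's recursion at an active square returns the
-- conjunction of the canonical values of its move targets
lemma pv_stable (board : List Int) (backRow : List Int) (mm : List (Int × List Int))
    (hsafe : pvSafe board backRow mm) :
    ∀ (d : Nat) (i : Int) (fuel : Nat), ((board.length : Int) - i).toNat = d →
    pvOk board.length i = true → pvActive board backRow i = true →
    (pvMMGet mm i).isSome = true → d + 1 < fuel →
    pvGoA board backRow mm fuel i
      = some (((pvMMGet mm i).getD []).all (pvVal board backRow mm)) := by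
  intro d
  induction d using Nat.strong_induction_on with
  | _ d ih =>
    intro i fuel hd hok hact hsome hfuel
    obtain ⟨f, rfl⟩ : ∃ f, fuel = f + 1 := ⟨fuel - 1, by omega⟩
    obtain ⟨v, hv⟩ := pv_get_some board i hok
    obtain ⟨ms, hms⟩ := Option.isSome_iff_exists.mp hsome
    have hactv := hact
    simp only [pvActive, Bool.and_eq_true, Bool.not_eq_true', beq_iff_eq] at hactv
    have hbr : backRow.contains (i - 1) = false := hactv.1
    have hv0 : v = 0 := by
      have := hactv.2
      rw [hv] at this
      simpa using this
    have hokI : 1 - (board.length : Int) ≤ i ∧ i ≤ (board.length : Int) := by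
      simpa [pvOk] using hok
    have hrec : ∀ m ∈ ms, pvGoA board backRow mm f m = some (pvVal board backRow mm m) := by
      intro m hm
      obtain ⟨hokm, hmore⟩ := hsafe i ms hms hact m hm
      have hokM : 1 - (board.length : Int) ≤ m ∧ m ≤ (board.length : Int) := by
        simpa [pvOk] using hokm
      by_cases hactm : pvActive board backRow m = true
      · obtain ⟨hlt, hsm⟩ := hmore hactm
        have hdm : (((board.length : Int)) - m).toNat < d := by omega
        have h1 := ih _ hdm m f rfl hokm hactm hsm (by omega)
        have h2 := ih _ hdm m ((((board.length : Int)) - m).toNat + 2) rfl hokm hactm hsm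
          (by omega)
        rw [h1]
        unfold pvVal
        rw [h2]
        rfl
      · rw [pv_goA_shallow board backRow mm m f (by omega) hokm hactm,
          pv_sval_eq board backRow mm m hokm hactm]
    unfold pvGoA
    simp only [hbr, Bool.false_eq_true, if_false, hv, hv0, beq_self_eq_true, if_true, hms]
    rw [pv_foldsc _ (pvVal board backRow mm) ms true hrec]
    simp

-- canonical value at an active square = conjunction over its move targets
lemma pv_val_active (board : List Int) (backRow : List Int) (mm : List (Int × List Int))
    (hsafe : pvSafe board backRow mm) (i : Int)
    (hok : pvOk board.length i = true) (hact : pvActive board backRow i = true)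
    (hsome : (pvMMGet mm i).isSome = true) :
    pvVal board backRow mm i = ((pvMMGet mm i).getD []).all (pvVal board backRow mm) := by
  unfold pvVal
  rw [pv_stable board backRow mm hsafe _ i _ rfl hok hact hsome (by omega)]
  rfl

-- B's set(backRow) has the same membership as backRow
lemma pv_backs_contains (backRow : List Int) (x : Int) :
    List.contains (PySem.Set.ofList backRow) x = backRow.contains x := by
  by_cases h : x ∈ backRow
  · have h2 : x ∈ PySem.Set.ofList backRow := (PySem.Set.mem_ofList backRow x).mpr h
    simp [h, h2]
  · have h2 : ¬ x ∈ PySem.Set.ofList backRow := fun hc => h ((PySem.Set.mem_ofList backRow x).mp hc)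
    simp [h, h2]

-- cache invariant: every stored entry is the canonical value of its square
def pvGood (board : List Int) (backRow : List Int) (mm : List (Int × List Int))
    (c : PySem.Dict Int Bool) : Prop :=
  ∀ i v, c.get? i = some v → v = pvVal board backRow mm i

lemma pv_good_insert (board : List Int) (backRow : List Int) (mm : List (Int × List Int))
    (c : PySem.Dict Int Bool) (i : Int) (hc : pvGood board backRow mm c) :
    pvGood board backRow mm (c.insert i (pvVal board backRow mm i)) := by
  intro j v hj
  rw [PySem.Dict.get?_insert] at hj
  by_cases hji : j = i
  · rw [if_pos hji] at hj
    cases hj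
    rw [hji]
  · rw [if_neg hji] at hj
    exact hc j v hj

-- B answers an inactive in-range square from the cache or in one step
lemma pv_checkB_shallow (board : List Int) (backRow : List Int) (mm : List (Int × List Int))
    (i : Int) (c : PySem.Dict Int Bool) (fuel : Nat) (hf : 0 < fuel)
    (hok : pvOk board.length i = true) (hact : ¬ pvActive board backRow i = true)
    (hc : pvGood board backRow mm c) :
    (pvCheckB board (PySem.Set.ofList backRow) mm fuel i c).1 = pvVal board backRow mm i ∧
    pvGood board backRow mm (pvCheckB board (PySem.Set.ofList backRow) mm fuel i c).2 := by
  obtain ⟨f, rfl⟩ : ∃ f, fuel = f + 1 := ⟨fuel - 1, by omega⟩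
  obtain ⟨v, hv⟩ := pv_get_some board i hok
  unfold pvCheckB
  cases hg : c.get? i with
  | some w => exact ⟨hc i w hg, hc⟩
  | none =>
    have hsv : pvVal board backRow mm i = pvSval board backRow i :=
      pv_sval_eq board backRow mm i hok hact
    simp only [pvActive, Bool.and_eq_true, Bool.not_eq_true', beq_iff_eq] at hact
    by_cases hbr : backRow.contains (i - 1) = true
    · have hcon : List.contains (PySem.Set.ofList backRow) (i - 1) = true := by
        rw [pv_backs_contains]; exact hbr
      have hval : pvVal board backRow mm i
          = (((PySem.List.pyGet? board (i - 1)).getD 0) == 0) := by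
        rw [hsv]; unfold pvSval; rw [if_pos hbr]
      simp only [hcon, if_true]
      refine ⟨hval.symm, ?_⟩
      have hgi := pv_good_insert board backRow mm c i hc
      rw [hval] at hgi
      exact hgi
    · have hcon : List.contains (PySem.Set.ofList backRow) (i - 1) = false := by
        rw [pv_backs_contains]; simpa using hbr
      have hbrf : backRow.contains (i - 1) = false := by simpa using hbr
      have hv0 : ¬ v = 0 := by
        intro h0
        exact hact ⟨hbrf, by rw [hv, h0]⟩
      have hz : (((PySem.List.pyGet? board (i - 1)).getD 0) == 0) = false := by
        rw [hv]; simpa using hv0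
      have hval : pvVal board backRow mm i = false := by
        rw [hsv]; unfold pvSval; rw [if_neg hbr]
      simp only [hcon, Bool.false_eq_true, if_false, hz]
      refine ⟨hval.symm, ?_⟩
      have hgi := pv_good_insert board backRow mm c i hc
      rw [hval] at hgi
      exact hgi

-- the short-circuiting fold over move targets computes the conjunction and
-- preserves the cache invariant
lemma pv_foldB (board : List Int) (backRow : List Int) (mm : List (Int × List Int)) (f : Nat) :
    ∀ (ms : List Int),
    (∀ m ∈ ms, ∀ c, pvGood board backRow mm c →
      (pvCheckB board (PySem.Set.ofList backRow) mm f m c).1 = pvVal board backRow mm m ∧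
      pvGood board backRow mm (pvCheckB board (PySem.Set.ofList backRow) mm f m c).2) →
    ∀ (b : Bool) (c : PySem.Dict Int Bool), pvGood board backRow mm c →
    (ms.foldl (fun acc m => if acc.1 then pvCheckB board (PySem.Set.ofList backRow) mm f m acc.2 else acc) (b, c)).1
      = (b && ms.all (pvVal board backRow mm)) ∧
    pvGood board backRow mm
      (ms.foldl (fun acc m => if acc.1 then pvCheckB board (PySem.Set.ofList backRow) mm f m acc.2 else acc) (b, c)).2 := by
  intro ms
  induction ms with
  | nil => intro _ b c hc; exact ⟨by simp, hc⟩
  | cons m rest ih =>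
    intro h b c hc
    have hm := h m List.mem_cons_self
    have hrest : ∀ x ∈ rest, ∀ c', pvGood board backRow mm c' →
        (pvCheckB board (PySem.Set.ofList backRow) mm f x c').1 = pvVal board backRow mm x ∧
        pvGood board backRow mm (pvCheckB board (PySem.Set.ofList backRow) mm f x c').2 :=
      fun x hx => h x (List.mem_cons_of_mem _ hx)
    cases b with
    | false =>
      simp only [List.foldl_cons, Bool.false_eq_true, if_false]
      have := ih hrest false c hc
      simpa using this
    | true =>
      simp only [List.foldl_cons, if_true]
      obtain ⟨hv, hg⟩ := hm c hc
      have := ih hrest (pvCheckB board (PySem.Set.ofList backRow) mm f m c).1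
        (pvCheckB board (PySem.Set.ofList backRow) mm f m c).2 hg
      rcases this with ⟨h1, h2⟩
      constructor
      · rw [h1, hv]
        simp [List.all_cons]
      · exact h2

-- B computes the canonical value at every safe in-range square
lemma pv_checkB_main (board : List Int) (backRow : List Int) (mm : List (Int × List Int))
    (hsafe : pvSafe board backRow mm) :
    ∀ (d : Nat) (i : Int) (c : PySem.Dict Int Bool) (fuel : Nat),
    ((board.length : Int) - i).toNat = d → pvOk board.length i = true →
    (pvActive board backRow i = true → (pvMMGet mm i).isSome = true) →
    d + 1 < fuel → pvGood board backRow mm c →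
    (pvCheckB board (PySem.Set.ofList backRow) mm fuel i c).1 = pvVal board backRow mm i ∧
    pvGood board backRow mm (pvCheckB board (PySem.Set.ofList backRow) mm fuel i c).2 := by
  intro d
  induction d using Nat.strong_induction_on with
  | _ d ih =>
    intro i c fuel hd hok hsome hfuel hc
    by_cases hact : pvActive board backRow i = true
    · obtain ⟨f, rfl⟩ : ∃ f, fuel = f + 1 := ⟨fuel - 1, by omega⟩
      obtain ⟨ms, hms⟩ := Option.isSome_iff_exists.mp (hsome hact)
      have hokI : 1 - (board.length : Int) ≤ i ∧ i ≤ (board.length : Int) := by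
        simpa [pvOk] using hok
      have hchild : ∀ m ∈ ms, ∀ c', pvGood board backRow mm c' →
          (pvCheckB board (PySem.Set.ofList backRow) mm f m c').1 = pvVal board backRow mm m ∧
          pvGood board backRow mm (pvCheckB board (PySem.Set.ofList backRow) mm f m c').2 := by
        intro m hm c' hc'
        obtain ⟨hokm, hmore⟩ := hsafe i ms hms hact m hm
        have hokM : 1 - (board.length : Int) ≤ m ∧ m ≤ (board.length : Int) := by
          simpa [pvOk] using hokm
        by_cases hactm : pvActive board backRow m = true
        · obtain ⟨hlt, hsm⟩ := hmore hactm
          have hdm : (((board.length : Int)) - m).toNat < d := by omega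
          exact ih _ hdm m c' f rfl hokm (fun _ => hsm) (by omega) hc'
        · exact pv_checkB_shallow board backRow mm m c' f (by omega) hokm hactm hc'
      have hactv := hact
      simp only [pvActive, Bool.and_eq_true, Bool.not_eq_true', beq_iff_eq] at hactv
      have hbr : backRow.contains (i - 1) = false := hactv.1
      have hz : (((PySem.List.pyGet? board (i - 1)).getD 0) == 0) = true := by
        rw [hactv.2]; rfl
      have hval := pv_val_active board backRow mm hsafe i hok hact (hsome hact)
      unfold pvCheckB
      cases hg : c.get? i with
      | some w => exact ⟨hc i w hg, hc⟩
      | none =>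
        simp only [pv_backs_contains, hbr, Bool.false_eq_true, if_false, hz, if_true, hms,
          Option.getD_some]
        obtain ⟨h1, h2⟩ := pv_foldB board backRow mm f ms hchild true c hc
        rw [hms] at hval
        simp only [Option.getD_some] at hval
        constructor
        · rw [h1, hval]; simp
        · rw [h1]
          have heq : (true && ms.all (pvVal board backRow mm)) = pvVal board backRow mm i := by
            rw [hval]; simp
          rw [heq]
          exact pv_good_insert board backRow mm _ i h2
    · exact pv_checkB_shallow board backRow mm i c fuel (by omega) hok hact hc

-- ===== VERDICT (by name: the statement is the Claim_ definition above) =====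
theorem isRunaway_spec : Claim_equal_isRunaway := by
  intro board index backRow mm _ hpre
  have hok := hpre.1
  have hidx := hpre.2.1
  have hsafe := pv_safe_of_pre board index backRow mm hpre
  have hokI : 1 - (board.length : Int) ≤ index ∧ index ≤ (board.length : Int) := by
    simpa [pvOk] using hok
  have hd : (((board.length : Int)) - index).toNat + 1 < board.length + board.length + 2 := by
    omega
  unfold Spec_isRunaway isRunaway isRunaway_alt
  have hB := pv_checkB_main board backRow mm hsafe _ index PySem.Dict.empty
    (board.length + board.length + 2) rfl hok hidx hd
    (by intro j v hj; simp [PySem.Dict.get?_empty] at hj)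
  rw [hB.1]
  by_cases hact : pvActive board backRow index = true
  · rw [pv_stable board backRow mm hsafe _ index _ rfl hok hact (hidx hact) hd,
      pv_val_active board backRow mm hsafe index hok hact (hidx hact)]
    rfl
  · rw [pv_goA_shallow board backRow mm index _ (by omega) hok hact,
      pv_sval_eq board backRow mm index hok hact]
    rfl
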